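-- pv_equiv track=rewrite | github.com/AleVlaKon/algorytm | 6/6.3.10.py | min_even_digit
-- ===== SOURCE A (Python) =====
-- def min_even_digit(num):
--     min_digit = 10
--
--     while num > 0:
--         last_digit = num % 10
--         if last_digit % 2 == 0 and last_digit < min_digit:
--             min_digit = last_digit
--         num //= 10
--
--     if min_digit == 10:
--         return -1
--     else:
--         return min_digit
-- ===== SOURCE B (Python) =====
-- def min_even_digit(num):
--     digits = set()
--     while num > 0:
--         digits.add(num % 10)
--         num //= 10
--     for d in (0, 2, 4, 6, 8):
--         if d in digits:
--             return d
--     return -1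
-- ===== Notes on version B (the rewrite author's own statement) =====
-- stated objective: alternative
-- what changed: Replaces the running-minimum scan with building the set of decimal digits and then probing the even candidates 0,2,4,6,8 in ascending order, returning the first one present (else -1).
import Mathlib
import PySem

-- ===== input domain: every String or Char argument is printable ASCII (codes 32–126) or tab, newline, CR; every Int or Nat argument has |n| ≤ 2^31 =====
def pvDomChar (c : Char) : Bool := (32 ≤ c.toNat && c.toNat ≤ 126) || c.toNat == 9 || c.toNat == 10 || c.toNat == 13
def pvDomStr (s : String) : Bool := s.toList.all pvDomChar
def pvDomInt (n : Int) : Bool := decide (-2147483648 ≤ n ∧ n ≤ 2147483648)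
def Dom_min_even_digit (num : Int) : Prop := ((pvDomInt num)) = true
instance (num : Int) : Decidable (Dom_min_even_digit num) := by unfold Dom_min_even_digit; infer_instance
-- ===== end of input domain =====

-- B replaces A's running-minimum scan over the digits with a digit set plus an
-- ascending probe of the even candidates 0,2,4,6,8 (alternative decomposition, same cost).

-- ===== PORT A =====
-- the 'while num > 0' loop carrying min_digit
def aLoop (num : Int) (min_digit : Int) : Int :=
  if h : num > 0 then
    let last_digit := PySem.Int.mod num 10
    aLoop (PySem.Int.floordiv num 10)
      (if last_digit % 2 = 0 ∧ last_digit < min_digit then last_digit else min_digit)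
  else min_digit
termination_by num.toNat
decreasing_by
  have h1 : PySem.Int.floordiv num 10 = num / 10 :=
    PySem.Int.floordiv_eq_ediv_of_pos (by omega)
  rw [h1]; omega

def min_even_digit (num : Int) : Int :=
  let min_digit := aLoop num 10
  if min_digit = 10 then -1 else min_digit

-- ===== PORT B =====
-- the 'while num > 0' loop building the set of digits
def bLoop (num : Int) (digits : PySem.Set Int) : PySem.Set Int :=
  if h : num > 0 then
    bLoop (PySem.Int.floordiv num 10) (PySem.Set.add digits (PySem.Int.mod num 10))
  else digits
termination_by num.toNat
decreasing_by
  have h1 : PySem.Int.floordiv num 10 = num / 10 :=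
    PySem.Int.floordiv_eq_ediv_of_pos (by omega)
  rw [h1]; omega

-- the 'for d in (0, 2, 4, 6, 8)' loop with early return
def bProbe (cands : List Int) (digits : PySem.Set Int) : Int :=
  match cands with
  | [] => -1
  | d :: rest => if PySem.Set.contains digits d then d else bProbe rest digits

def min_even_digit_alt (num : Int) : Int :=
  bProbe [0, 2, 4, 6, 8] (bLoop num PySem.Set.empty)

-- ===== PRECONDITION & SPEC =====
def Spec_min_even_digit (num : Int) (out : Int) : Prop := out = min_even_digit_alt num
instance (num : Int) (out : Int) : Decidable (Spec_min_even_digit num out) := by unfold Spec_min_even_digit; infer_instance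

-- ===== CLAIM (what is proved, stated in full; the proofs are below) =====
def Claim_equal_min_even_digit : Prop := ∀ (num : Int), Dom_min_even_digit num → Spec_min_even_digit num (min_even_digit num)

-- ===== LEMMAS AND PROOFS =====

-- ghost list of digits produced by the shared loop shape
def pvDigits (num : Int) : List Int :=
  if h : num > 0 then
    PySem.Int.mod num 10 :: pvDigits (PySem.Int.floordiv num 10)
  else []
termination_by num.toNat
decreasing_by
  have h1 : PySem.Int.floordiv num 10 = num / 10 :=
    PySem.Int.floordiv_eq_ediv_of_pos (by omega)
  rw [h1]; omega

lemma pvDigits_bound (num : Int) : ∀ d ∈ pvDigits num, 0 ≤ d ∧ d < 10 := by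
  unfold pvDigits
  split
  · rename_i h
    intro d hd
    rcases List.mem_cons.mp hd with rfl | hd
    · exact ⟨PySem.Int.mod_nonneg num (by omega), PySem.Int.mod_lt num (by omega)⟩
    · exact pvDigits_bound _ d hd
  · intro d hd; simp at hd
termination_by num.toNat
decreasing_by
  have h1 : PySem.Int.floordiv num 10 = num / 10 :=
    PySem.Int.floordiv_eq_ediv_of_pos (by omega)
  rw [h1]; omega

lemma aLoop_eq_foldl (num : Int) : ∀ m, aLoop num m =
    (pvDigits num).foldl (fun acc d => if d % 2 = 0 ∧ d < acc then d else acc) m := by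
  unfold aLoop pvDigits
  split
  · intro m
    simp only [List.foldl_cons]
    exact aLoop_eq_foldl _ _
  · intro m; simp
termination_by num.toNat
decreasing_by
  have h1 : PySem.Int.floordiv num 10 = num / 10 :=
    PySem.Int.floordiv_eq_ediv_of_pos (by omega)
  rw [h1]; omega

lemma mem_bLoop (num : Int) : ∀ s d, d ∈ bLoop num s ↔ d ∈ s ∨ d ∈ pvDigits num := by
  unfold bLoop pvDigits
  split
  · intro s d
    rw [mem_bLoop]
    simp [PySem.Set.mem_add]
    tauto
  · intro s d; simp
termination_by num.toNat
decreasing_by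
  have h1 : PySem.Int.floordiv num 10 = num / 10 :=
    PySem.Int.floordiv_eq_ediv_of_pos (by omega)
  rw [h1]; omega

-- foldl-min characterisation
lemma foldl_step_le (l : List Int) : ∀ m, l.foldl (fun acc d => if d % 2 = 0 ∧ d < acc then d else acc) m ≤ m := by
  induction l with
  | nil => intro m; simp
  | cons d l ih =>
    intro m
    simp only [List.foldl_cons]
    split
    · exact le_trans (ih _) (by omega)
    · exact ih m

lemma foldl_step_le_mem (l : List Int) : ∀ m d, d ∈ l → d % 2 = 0 →
    l.foldl (fun acc d => if d % 2 = 0 ∧ d < acc then d else acc) m ≤ d := by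
  induction l with
  | nil => intro m d hd; simp at hd
  | cons e l ih =>
    intro m d hd hev
    simp only [List.foldl_cons]
    rcases List.mem_cons.mp hd with rfl | hd
    · by_cases h : d < m
      · rw [if_pos ⟨hev, h⟩]
        exact foldl_step_le l d
      · have : ¬ (d % 2 = 0 ∧ d < m) := by omega
        rw [if_neg this]
        exact le_trans (foldl_step_le l m) (by omega)
    · exact ih _ d hd hev

lemma foldl_step_mem (l : List Int) : ∀ m,
    l.foldl (fun acc d => if d % 2 = 0 ∧ d < acc then d else acc) m = m ∨
    (l.foldl (fun acc d => if d % 2 = 0 ∧ d < acc then d else acc) m ∈ l ∧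
     l.foldl (fun acc d => if d % 2 = 0 ∧ d < acc then d else acc) m % 2 = 0) := by
  induction l with
  | nil => intro m; simp
  | cons d l ih =>
    intro m
    simp only [List.foldl_cons]
    split
    · rename_i h
      rcases ih d with h1 | h1
      · right; exact ⟨by rw [h1]; exact List.mem_cons_self, by rw [h1]; exact h.1⟩
      · right; exact ⟨List.mem_cons_of_mem _ h1.1, h1.2⟩
    · rcases ih m with h1 | h1
      · left; exact h1
      · right; exact ⟨List.mem_cons_of_mem _ h1.1, h1.2⟩

-- the main equivalence
theorem min_even_digit_eq (num : Int) : min_even_digit num = min_even_digit_alt num := by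
  unfold min_even_digit min_even_digit_alt
  have hfold := aLoop_eq_foldl num 10
  have hbound := pvDigits_bound num
  have hmem0 := mem_bLoop num PySem.Set.empty
  generalize hL : pvDigits num = L at hfold hbound hmem0
  generalize hr : aLoop num 10 = r at hfold
  have hmem : ∀ d : Int, (PySem.Set.contains (bLoop num PySem.Set.empty) d = true) ↔ d ∈ L := by
    intro d
    rw [PySem.Set.contains_iff, hmem0 d]
    simp [PySem.Set.empty]
  have hle : r ≤ 10 := by rw [hfold]; exact foldl_step_le L 10
  have hmin : ∀ d ∈ L, d % 2 = 0 → r ≤ d := by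
    intro d hd hev; rw [hfold]; exact foldl_step_le_mem L 10 d hd hev
  have hin : r = 10 ∨ (r ∈ L ∧ r % 2 = 0) := by rw [hfold]; exact foldl_step_mem L 10
  simp only [bProbe, hmem]
  by_cases h0 : (0 : Int) ∈ L
  · have h1 := hmin 0 h0 (by decide)
    have h2 : 0 ≤ r := by
      rcases hin with h | h
      · omega
      · exact (hbound r h.1).1
    rw [if_pos h0, if_neg (show ¬ r = 10 by omega)]
    omega
  · rw [if_neg h0]
    have hr0 : r ≠ 0 := by
      rcases hin with h | h
      · omega
      · intro he; rw [he] at h; exact h0 h.1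
    by_cases h2 : (2 : Int) ∈ L
    · have h1 := hmin 2 h2 (by decide)
      have heq : r = 2 := by
        rcases hin with h | h
        · omega
        · have := (hbound r h.1).1; have := h.2; omega
      rw [if_pos h2, if_neg (show ¬ r = 10 by omega)]
      omega
    · rw [if_neg h2]
      have hr2 : r ≠ 2 := by
        rcases hin with h | h
        · omega
        · intro he; rw [he] at h; exact h2 h.1
      by_cases h4 : (4 : Int) ∈ L
      · have h1 := hmin 4 h4 (by decide)
        have heq : r = 4 := by
          rcases hin with h | h
          · omega
          · have := (hbound r h.1).1; have := h.2; omega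
        rw [if_pos h4, if_neg (show ¬ r = 10 by omega)]
        omega
      · rw [if_neg h4]
        have hr4 : r ≠ 4 := by
          rcases hin with h | h
          · omega
          · intro he; rw [he] at h; exact h4 h.1
        by_cases h6 : (6 : Int) ∈ L
        · have h1 := hmin 6 h6 (by decide)
          have heq : r = 6 := by
            rcases hin with h | h
            · omega
            · have := (hbound r h.1).1; have := h.2; omega
          rw [if_pos h6, if_neg (show ¬ r = 10 by omega)]
          omega
        · rw [if_neg h6]
          have hr6 : r ≠ 6 := by
            rcases hin with h | h
            · omega
            · intro he; rw [he] at h; exact h6 h.1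
          by_cases h8 : (8 : Int) ∈ L
          · have h1 := hmin 8 h8 (by decide)
            have heq : r = 8 := by
              rcases hin with h | h
              · omega
              · have := (hbound r h.1).1; have := h.2; omega
            rw [if_pos h8, if_neg (show ¬ r = 10 by omega)]
            omega
          · rw [if_neg h8]
            have heq : r = 10 := by
              rcases hin with h | h
              · exact h
              · exfalso
                have hb := hbound r h.1
                have hev := h.2
                have hc : r = 0 ∨ r = 2 ∨ r = 4 ∨ r = 6 ∨ r = 8 := by omega
                rcases hc with rfl | rfl | rfl | rfl | rfl
                · exact h0 h.1
                · exact h2 h.1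
                · exact h4 h.1
                · exact h6 h.1
                · exact h8 h.1
            rw [if_pos heq]

-- ===== VERDICT (by name: the statement is the Claim_ definition above) =====
theorem min_even_digit_spec : Claim_equal_min_even_digit := by
  intro num _
  unfold Spec_min_even_digit
  exact min_even_digit_eq num
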